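-- pv_equiv track=rewrite | github.com/simulahmed2113/Lume | core/gcode_processor.py | _has_m5
-- ===== SOURCE A (Python) =====
-- def _strip_inline_comment(line: str) -> str:
--     """Strip inline comments starting with ';'."""
--     return line.split(";", 1)[0]
--
-- def _is_full_line_comment(line: str) -> bool:
--     s = line.strip()
--     return s.startswith("(") and s.endswith(")")
--
-- def _has_m5(line: str) -> bool:
--     """
--     Return True if line contains an M5/M05 word used as G-code (not inside comments).
--     """
--     if _is_full_line_comment(line):
--         return False
--     code = _strip_inline_comment(line).strip().upper()
--     if not code:
--         return False
--     for token in code.split():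
--         if token in ("M5", "M05"):
--             return True
--     return False
-- ===== SOURCE B (Python) =====
-- def _has_m5(line: str) -> bool:
--     """
--     Return True if line contains an M5/M05 word used as G-code (not inside comments).
--     Positional scan: look for 'M5'/'M05' at a whitespace-delimited position
--     instead of building a token list with split().
--     """
--     s = line.strip()
--     if s.startswith("(") and s.endswith(")"):
--         return False
--     code = line.split(";", 1)[0].strip().upper()
--     n = len(code)
--     for i in range(n):
--         for w in ("M5", "M05"):
--             if (code[i:i + len(w)] == w
--                     and (i == 0 or code[i - 1].isspace())
--                     and (i + len(w) == n or code[i + len(w)].isspace())):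
--                 return True
--     return False
-- ===== Notes on version B (the rewrite author's own statement) =====
-- stated objective: alternative
-- what changed: B replaces the tokenize-and-compare loop (split() then token membership in ('M5','M05')) with a direct positional scan that looks for 'M5'/'M05' occurring as a whole whitespace-delimited word, so no token list is ever built.
import Mathlib
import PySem

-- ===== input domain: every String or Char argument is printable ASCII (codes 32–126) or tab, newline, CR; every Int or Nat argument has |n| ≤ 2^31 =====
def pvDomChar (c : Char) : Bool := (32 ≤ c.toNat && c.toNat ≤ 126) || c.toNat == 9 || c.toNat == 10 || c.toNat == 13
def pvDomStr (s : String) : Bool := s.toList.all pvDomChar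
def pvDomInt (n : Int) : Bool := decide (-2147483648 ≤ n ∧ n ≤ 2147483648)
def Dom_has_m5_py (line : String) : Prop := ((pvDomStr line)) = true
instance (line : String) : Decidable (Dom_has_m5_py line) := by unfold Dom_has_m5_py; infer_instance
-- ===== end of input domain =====

-- B replaces A's split()-then-token-membership loop by a direct positional scan for a
-- whitespace-delimited 'M5'/'M05'; same result, no token list is built (objective: alternative).

-- ===== PORT A =====
-- line.split(";", 1)[0] : split(";",1) always returns a nonempty list, so [0] never raises
def aStripInlineComment (l : List Char) : List Char :=
  ((PySem.Chars.splitMax? l [';'] 1).getD []).headD []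

def aIsFullLineComment (l : List Char) : Bool :=
  let s := PySem.Chars.strip l
  PySem.Chars.startswith s ['('] && PySem.Chars.endswith s [')']

def has_m5_py (line : String) : Bool :=
  if aIsFullLineComment line.toList then false
  else
    let code := PySem.Chars.upper (PySem.Chars.strip (aStripInlineComment line.toList))
    if code.isEmpty then false
    else (PySem.Chars.split₀ code).any (fun token => token == ['M', '5'] || token == ['M', '0', '5'])

-- ===== PORT B =====
-- line.split(";", 1)[0] (B-side copy of the same one-line helper)
def bFirstField (l : List Char) : List Char :=
  ((PySem.Chars.splitMax? l [';'] 1).getD []).headD []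

-- code[i:i+len(w)] == w and (i == 0 or code[i-1].isspace()) and (i+len(w) == n or code[i+len(w)].isspace())
-- (code.getD is only read at indices the guards put in range, exactly where Python reads code[...])
def bCheckAt (code : List Char) (w : List Char) (i : Nat) : Bool :=
  decide ((code.drop i).take w.length = w)
    && (decide (i = 0) || PySem.Chars.isspace (code.getD (i - 1) ' '))
    && (decide (i + w.length = code.length) || PySem.Chars.isspace (code.getD (i + w.length) ' '))

def has_m5_py_alt (line : String) : Bool :=
  let s := PySem.Chars.strip line.toList
  if PySem.Chars.startswith s ['('] && PySem.Chars.endswith s [')'] then false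
  else
    let code := PySem.Chars.upper (PySem.Chars.strip (bFirstField line.toList))
    (List.range code.length).any (fun i =>
      [['M', '5'], ['M', '0', '5']].any (fun w => bCheckAt code w i))

-- ===== PRECONDITION & SPEC =====
def Spec_has_m5_py (line : String) (out : Bool) : Prop := out = has_m5_py_alt line
instance (line : String) (out : Bool) : Decidable (Spec_has_m5_py line out) := by unfold Spec_has_m5_py; infer_instance

-- ===== CLAIM (what is proved, stated in full; the proofs are below) =====
def Claim_equal_has_m5_py : Prop := ∀ (line : String), Dom_has_m5_py line → Spec_has_m5_py line (has_m5_py line)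

-- ===== LEMMAS AND PROOFS =====

-- w occurs in s as a whole whitespace-delimited word
def OccWord (w s : List Char) : Prop :=
  ∃ p q, s = p ++ w ++ q ∧ (∀ c, p.getLast? = some c → PySem.Chars.isspace c = true)
    ∧ (∀ c, q.head? = some c → PySem.Chars.isspace c = true)

theorem go_acc (s : List Char) : ∀ (cur : List Char) (acc : List (List Char)),
    PySem.Chars.split₀.go s cur acc = acc.reverse ++ PySem.Chars.split₀.go s cur [] := by
  induction s with
  | nil =>
    intro cur acc
    simp only [PySem.Chars.split₀.go]
    by_cases h : cur.isEmpty <;> simp [h]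
  | cons c rest ih =>
    intro cur acc
    simp only [PySem.Chars.split₀.go]
    by_cases hs : PySem.Chars.isspace c
    · by_cases hc : cur.isEmpty
      · simp only [hs, hc, if_true]
        exact ih [] acc
      · simp only [hs, hc, if_true, Bool.false_eq_true, if_false]
        rw [ih [] (cur.reverse :: acc), ih [] [cur.reverse]]
        simp
    · simp only [hs, Bool.false_eq_true, if_false]
      exact ih _ _

theorem split₀_cons_space {c : Char} (h : PySem.Chars.isspace c = true) (s : List Char) :
    PySem.Chars.split₀ (c :: s) = PySem.Chars.split₀ s := by
  simp only [PySem.Chars.split₀, PySem.Chars.split₀.go, h, if_true, List.isEmpty_nil]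

theorem go_token (s : List Char) : ∀ (t : List Char) (acc : List (List Char)), t ≠ [] →
    PySem.Chars.split₀.go s t acc =
      acc.reverse ++ (t.reverse ++ s.takeWhile (fun c => !PySem.Chars.isspace c))
        :: PySem.Chars.split₀ (s.dropWhile (fun c => !PySem.Chars.isspace c)) := by
  induction s with
  | nil =>
    intro t acc ht
    simp only [PySem.Chars.split₀.go, List.takeWhile_nil, List.dropWhile_nil]
    simp [PySem.Chars.split₀, PySem.Chars.split₀.go, ht]
  | cons c rest ih =>
    intro t acc ht
    simp only [PySem.Chars.split₀.go]
    by_cases hs : PySem.Chars.isspace c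
    · simp only [hs, if_true, List.isEmpty_eq_false_iff.mpr ht, List.takeWhile_cons, Bool.not_eq_true',
        List.dropWhile_cons]
      simp only [Bool.false_eq_true, if_false]
      rw [go_acc]
      have : PySem.Chars.split₀.go rest [] [] = PySem.Chars.split₀.go (c :: rest) [] [] :=
        (split₀_cons_space hs rest).symm
      simp [PySem.Chars.split₀] at this ⊢
      exact this
    · simp only [hs, Bool.false_eq_true, if_false, List.takeWhile_cons, List.dropWhile_cons]
      rw [ih (c :: t) acc (by simp)]
      simp

theorem split₀_cons_nonspace {c : Char} (h : PySem.Chars.isspace c = false) (s : List Char) :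
    PySem.Chars.split₀ (c :: s) =
      (c :: s.takeWhile (fun c => !PySem.Chars.isspace c))
        :: PySem.Chars.split₀ (s.dropWhile (fun c => !PySem.Chars.isspace c)) := by
  simp only [PySem.Chars.split₀, PySem.Chars.split₀.go, h, Bool.false_eq_true, if_false]
  rw [go_token s [c] [] (by simp)]
  simp [PySem.Chars.split₀]

theorem occ_cons_space {c : Char} (hs : PySem.Chars.isspace c = true)
    {w : List Char} (hw : w ≠ []) (hns : ∀ d ∈ w, PySem.Chars.isspace d = false)
    (s : List Char) : OccWord w (c :: s) ↔ OccWord w s := by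
  constructor
  · rintro ⟨p, q, h, hl, hr⟩
    cases p with
    | nil =>
      exfalso
      cases w with
      | nil => exact hw rfl
      | cons w0 ws =>
        simp only [List.nil_append, List.cons_append, List.cons.injEq] at h
        have := hns w0 (by simp)
        rw [h.1] at hs
        rw [this] at hs; exact Bool.false_ne_true hs
    | cons p0 ps =>
      simp only [List.cons_append, List.cons.injEq] at h
      refine ⟨ps, q, h.2, ?_, hr⟩
      intro d hd
      cases ps with
      | nil => simp at hd
      | cons a b => exact hl d (by rw [List.getLast?_cons_cons]; exact hd)
  · rintro ⟨p, q, h, hl, hr⟩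
    refine ⟨c :: p, q, by simp [h], ?_, hr⟩
    intro d hd
    cases p with
    | nil => simp at hd; rw [← hd]; exact hs
    | cons a b => exact hl d (by rwa [List.getLast?_cons_cons] at hd)

theorem occ_append_token {t₀ s' w : List Char}
    (ht0 : t₀ ≠ []) (ht0ns : ∀ d ∈ t₀, PySem.Chars.isspace d = false)
    (hs' : ∀ d, s'.head? = some d → PySem.Chars.isspace d = true)
    (hw : w ≠ []) (hns : ∀ d ∈ w, PySem.Chars.isspace d = false) :
    OccWord w (t₀ ++ s') ↔ w = t₀ ∨ OccWord w s' := by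
  constructor
  · rintro ⟨p, q, h, hl, hr⟩
    cases p with
    | nil =>
      left
      simp only [List.nil_append] at h
      have hpw : w <+: t₀ ++ s' := ⟨q, h.symm⟩
      have hpt : t₀ <+: t₀ ++ s' := List.prefix_append t₀ s'
      rcases List.prefix_or_prefix_of_prefix hpw hpt with hwt | htw
      · obtain ⟨r, hr2⟩ := hwt
        cases r with
        | nil => simpa using hr2
        | cons r0 rs =>
          exfalso
          rw [← hr2, List.append_assoc] at h
          have hq : q = (r0 :: rs) ++ s' := by
            have := List.append_cancel_left h
            exact this.symm
          have : PySem.Chars.isspace r0 = true := hr r0 (by rw [hq]; rfl)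
          have hmem : r0 ∈ t₀ := by rw [← hr2]; simp
          rw [ht0ns r0 hmem] at this; exact Bool.false_ne_true this
      · obtain ⟨r, hw2⟩ := htw
        cases r with
        | nil => simpa using hw2.symm
        | cons r0 rs =>
          exfalso
          rw [← hw2, List.append_assoc] at h
          have hseq : s' = (r0 :: rs) ++ q := List.append_cancel_left h
          have : PySem.Chars.isspace r0 = true := hs' r0 (by rw [hseq]; rfl)
          have hmem : r0 ∈ w := by rw [← hw2]; simp
          rw [hns r0 hmem] at this; exact Bool.false_ne_true this
    | cons p0 ps =>
      right
      have hp : (p0 :: ps) <+: t₀ ++ s' := ⟨w ++ q, by rw [h, List.append_assoc]⟩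
      have hpt : t₀ <+: t₀ ++ s' := List.prefix_append t₀ s'
      rcases List.prefix_or_prefix_of_prefix hp hpt with hpt₀ | ht₀p
      · exfalso
        obtain ⟨d, hd⟩ := List.getLast?_isSome.mpr (List.cons_ne_nil p0 ps) |> Option.isSome_iff_exists.mp
        have hdm : d ∈ (p0 :: ps) := List.mem_of_getLast? hd
        have : PySem.Chars.isspace d = true := hl d hd
        rw [ht0ns d (hpt₀.subset hdm)] at this; exact Bool.false_ne_true this
      · obtain ⟨p', hp'⟩ := ht₀p
        rw [← hp', List.append_assoc, List.append_assoc] at h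
        have hseq0 : s' = p' ++ (w ++ q) := List.append_cancel_left h
        refine ⟨p', q, by rw [hseq0]; simp [List.append_assoc], ?_, hr⟩
        intro d hd
        cases hp'nil : p' with
        | nil => subst hp'nil; simp at hd
        | cons a b =>
          apply hl
          rw [← hp', List.getLast?_append_of_ne_nil t₀ (by simp [hp'nil])]
          exact hd
  · rintro (rfl | ⟨p, q, h, hl, hr⟩)
    · exact ⟨[], s', by simp, by simp, hs'⟩
    · cases p with
      | nil =>
        exfalso
        simp only [List.nil_append] at h
        cases w with
        | nil => exact hw rfl
        | cons w0 ws =>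
          have : PySem.Chars.isspace w0 = true := hs' w0 (by rw [h]; rfl)
          rw [hns w0 (by simp)] at this; exact Bool.false_ne_true this
      | cons p0 ps =>
        refine ⟨t₀ ++ (p0 :: ps), q, by rw [h]; simp, ?_, hr⟩
        intro d hd
        apply hl
        rwa [List.getLast?_append_of_ne_nil _ (by simp)] at hd

theorem mem_split₀_iff_occ (w : List Char) (hw : w ≠ [])
    (hns : ∀ c ∈ w, PySem.Chars.isspace c = false) (s : List Char) :
    w ∈ PySem.Chars.split₀ s ↔ OccWord w s := by
  suffices H : ∀ n (s : List Char), s.length ≤ n → (w ∈ PySem.Chars.split₀ s ↔ OccWord w s) from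
    H s.length s le_rfl
  intro n
  induction n with
  | zero =>
    intro s hs
    have : s = [] := List.length_eq_zero_iff.mp (Nat.le_zero.mp hs)
    subst this
    constructor
    · intro h; exact absurd h (by simp [PySem.Chars.split₀, PySem.Chars.split₀.go])
    · rintro ⟨p, q, h, -, -⟩
      exfalso
      have := congrArg List.length h
      simp at this
      have : w.length = 0 := by omega
      exact hw (List.length_eq_zero_iff.mp this)
  | succ n ih =>
    intro s hs
    cases s with
    | nil => exact ih [] (by simp)
    | cons c rest =>
      by_cases hc : PySem.Chars.isspace c = true
      · rw [split₀_cons_space hc, occ_cons_space hc hw hns,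
          ih rest (by simpa using Nat.succ_le_succ_iff.mp hs)]
      · have hc' : PySem.Chars.isspace c = false := by simpa using hc
        rw [split₀_cons_nonspace hc']
        have hrw : c :: rest =
            (c :: rest.takeWhile (fun d => !PySem.Chars.isspace d)) ++
              rest.dropWhile (fun d => !PySem.Chars.isspace d) := by
          simp [List.takeWhile_append_dropWhile]
        rw [show OccWord w (c :: rest) ↔ OccWord w
            ((c :: rest.takeWhile (fun d => !PySem.Chars.isspace d)) ++
              rest.dropWhile (fun d => !PySem.Chars.isspace d)) from by rw [← hrw]]
        rw [occ_append_token (by simp)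
          (by
            intro d hd
            rcases List.mem_cons.mp hd with rfl | hd
            · exact hc'
            · have := List.mem_takeWhile_imp hd
              simpa using this)
          (by
            intro d hd
            have h2 := List.head?_dropWhile_not (fun d => !PySem.Chars.isspace d) rest
            rw [hd] at h2
            simpa using h2)
          hw hns]
        rw [List.mem_cons, ih (rest.dropWhile (fun d => !PySem.Chars.isspace d))
          (le_trans (List.length_dropWhile_le _ _) (Nat.succ_le_succ_iff.mp hs))]

theorem occ_iff_check (w : List Char) (hw : w ≠ []) (code : List Char) :
    OccWord w code ↔ ∃ i < code.length, bCheckAt code w i = true := by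
  constructor
  · rintro ⟨p, q, rfl, hl, hr⟩
    have hwp : 0 < w.length := List.length_pos_of_ne_nil hw
    refine ⟨p.length, by simp; omega, ?_⟩
    unfold bCheckAt
    simp only [Bool.and_eq_true, Bool.or_eq_true, decide_eq_true_eq]
    refine ⟨⟨?_, ?_⟩, ?_⟩
    · rw [List.append_assoc, List.drop_left, List.take_left]
    · by_cases hp : p = []
      · left; simp [hp]
      · right
        have hplen : 0 < p.length := List.length_pos_of_ne_nil hp
        have hidx : p.length - 1 < (p ++ w ++ q).length := by simp; omega
        rw [List.getD_eq_getElem _ _ hidx]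
        have hlt : p.length - 1 < p.length := by omega
        rw [List.getElem_append_left (by simp; omega : p.length - 1 < (p ++ w).length),
          List.getElem_append_left hlt]
        apply hl
        rw [List.getLast?_eq_getElem?, List.getElem?_eq_getElem hlt]
    · cases q with
      | nil => left; simp
      | cons q0 qs =>
        right
        rw [List.getD_append_right (p ++ w) (q0 :: qs) ' ' _ (by simp)]
        have : p.length + w.length - (p ++ w).length = 0 := by simp
        rw [this]
        exact hr q0 rfl
  · rintro ⟨i, hi, hchk⟩
    unfold bCheckAt at hchk
    simp only [Bool.and_eq_true, Bool.or_eq_true, decide_eq_true_eq] at hchk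
    obtain ⟨⟨hslice, hleft⟩, hright⟩ := hchk
    have hwlen : w.length ≤ code.length - i := by
      have := congrArg List.length hslice
      simp at this
      omega
    have hsplit : code = code.take i ++ w ++ code.drop (i + w.length) := by
      have h2 : code.drop i = w ++ code.drop (i + w.length) := by
        conv_lhs => rw [← List.take_append_drop w.length (code.drop i)]
        rw [hslice, List.drop_drop]
      rw [List.append_assoc, ← h2, List.take_append_drop]
    refine ⟨code.take i, code.drop (i + w.length), hsplit, ?_, ?_⟩
    · intro d hd
      have hi0 : 0 < i := by
        rcases Nat.eq_zero_or_pos i with h0 | h0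
        · subst h0; simp at hd
        · exact h0
      have hsp : PySem.Chars.isspace (code.getD (i - 1) ' ') = true := by
        rcases hleft with hi0' | hsp
        · omega
        · exact hsp
      have htl : (code.take i).getLast? = code[i - 1]? := by
        rw [List.getLast?_eq_getElem?, List.length_take, Nat.min_eq_left (le_of_lt hi),
          List.getElem?_take_of_lt (by omega)]
      rw [htl, List.getElem?_eq_getElem (by omega)] at hd
      have hd' : d = code[i - 1] := (Option.some.inj hd).symm
      rw [hd']
      rwa [List.getD_eq_getElem _ _ (by omega)] at hsp
    · intro d hd
      rw [List.head?_drop] at hd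
      have hlt : i + w.length < code.length := by
        rcases Nat.lt_or_ge (i + w.length) code.length with h | h
        · exact h
        · exfalso
          have heq : i + w.length = code.length := by omega
          rw [heq, List.getElem?_eq_none_iff.mpr le_rfl] at hd
          simp at hd
      have hsp : PySem.Chars.isspace (code.getD (i + w.length) ' ') = true := by
        rcases hright with hend | hsp
        · omega
        · exact hsp
      rw [List.getElem?_eq_getElem hlt] at hd
      have hd' : d = code[i + w.length] := (Option.some.inj hd).symm
      rw [hd']
      rwa [List.getD_eq_getElem _ _ hlt] at hsp

theorem word_iff_check (w : List Char) (hw : w ≠ [])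
    (hns : ∀ c ∈ w, PySem.Chars.isspace c = false) (code : List Char) :
    w ∈ PySem.Chars.split₀ code ↔ ∃ i < code.length, bCheckAt code w i = true :=
  (mem_split₀_iff_occ w hw hns code).trans (occ_iff_check w hw code)

-- ===== VERDICT (by name: the statement is the Claim_ definition above) =====
theorem has_m5_py_spec : Claim_equal_has_m5_py := by
  unfold Claim_equal_has_m5_py
  intro line _
  unfold Spec_has_m5_py has_m5_py has_m5_py_alt aIsFullLineComment bFirstField aStripInlineComment
  by_cases hg : (PySem.Chars.startswith (PySem.Chars.strip line.toList) ['('] &&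
      PySem.Chars.endswith (PySem.Chars.strip line.toList) [')']) = true
  · simp [hg]
  · rw [if_neg hg, if_neg hg]
    generalize PySem.Chars.upper (PySem.Chars.strip
      (((PySem.Chars.splitMax? line.toList [';'] 1).getD []).headD [])) = code
    by_cases hc : code = []
    · subst hc; simp
    · rw [if_neg (by simp [hc])]
      rw [Bool.eq_iff_iff]
      have h1 : ((PySem.Chars.split₀ code).any
            (fun t => t == ['M', '5'] || t == ['M', '0', '5'])) = true ↔
          (['M', '5'] ∈ PySem.Chars.split₀ code ∨ ['M', '0', '5'] ∈ PySem.Chars.split₀ code) := by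
        simp only [List.any_eq_true, Bool.or_eq_true, beq_iff_eq]
        constructor
        · rintro ⟨t, ht, rfl | rfl⟩
          · exact Or.inl ht
          · exact Or.inr ht
        · rintro (h | h)
          · exact ⟨_, h, Or.inl rfl⟩
          · exact ⟨_, h, Or.inr rfl⟩
      have h2 : ((List.range code.length).any (fun i =>
            [['M', '5'], ['M', '0', '5']].any (fun w => bCheckAt code w i))) = true ↔
          ((∃ i < code.length, bCheckAt code ['M', '5'] i = true) ∨
            (∃ i < code.length, bCheckAt code ['M', '0', '5'] i = true)) := by
        simp only [List.any_eq_true, List.mem_range, List.mem_cons,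
          List.not_mem_nil, or_false]
        constructor
        · rintro ⟨i, hi, w, (rfl | rfl), hchk⟩
          · exact Or.inl ⟨i, hi, hchk⟩
          · exact Or.inr ⟨i, hi, hchk⟩
        · rintro (⟨i, hi, hchk⟩ | ⟨i, hi, hchk⟩)
          · exact ⟨i, hi, ['M', '5'], Or.inl rfl, hchk⟩
          · exact ⟨i, hi, ['M', '0', '5'], Or.inr rfl, hchk⟩
      rw [h1, h2]
      have hns1 : ∀ c ∈ (['M', '5'] : List Char), PySem.Chars.isspace c = false := by
        intro c hcm
        rcases List.mem_cons.mp hcm with rfl | hcm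
        · rfl
        · rcases List.mem_cons.mp hcm with rfl | hcm
          · rfl
          · simp at hcm
      have hns2 : ∀ c ∈ (['M', '0', '5'] : List Char), PySem.Chars.isspace c = false := by
        intro c hcm
        rcases List.mem_cons.mp hcm with rfl | hcm
        · rfl
        · rcases List.mem_cons.mp hcm with rfl | hcm
          · rfl
          · rcases List.mem_cons.mp hcm with rfl | hcm
            · rfl
            · simp at hcm
      exact or_congr
        (word_iff_check ['M', '5'] (by simp) hns1 code)
        (word_iff_check ['M', '0', '5'] (by simp) hns2 code)
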